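-- pv_equiv track=rewrite | github.com/Grzegorz-Oledzki/advent-of-code | 2019/2019 day 1 .py | calculate_sum_of_fuel_part_2
-- ===== SOURCE A (Python) =====
-- def calculate_sum_of_fuel_part_2(mass_list):
--     final_sum_of_fuel = 0
--     for mass in mass_list:
--         fuel = int((int(mass) / 3) - 2)
--         while fuel > 0:
--             final_sum_of_fuel += fuel
--             fuel = int((int(fuel) / 3) - 2)
--     return final_sum_of_fuel
-- ===== SOURCE B (Python) =====
-- def calculate_sum_of_fuel_part_2(mass_list):
--     def fuel_for(m):
--         fuel = int((m / 3) - 2)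
--         return 0 if fuel <= 0 else fuel + fuel_for(fuel)
--     return sum(fuel_for(int(mass)) for mass in mass_list)
-- ===== Notes on version B (the rewrite author's own statement) =====
-- stated objective: simpler
-- what changed: Replaces the explicit while-loop with a running accumulator by a recursive fuel_for helper over the fuel chain plus a sum() over the list.
import Mathlib
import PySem

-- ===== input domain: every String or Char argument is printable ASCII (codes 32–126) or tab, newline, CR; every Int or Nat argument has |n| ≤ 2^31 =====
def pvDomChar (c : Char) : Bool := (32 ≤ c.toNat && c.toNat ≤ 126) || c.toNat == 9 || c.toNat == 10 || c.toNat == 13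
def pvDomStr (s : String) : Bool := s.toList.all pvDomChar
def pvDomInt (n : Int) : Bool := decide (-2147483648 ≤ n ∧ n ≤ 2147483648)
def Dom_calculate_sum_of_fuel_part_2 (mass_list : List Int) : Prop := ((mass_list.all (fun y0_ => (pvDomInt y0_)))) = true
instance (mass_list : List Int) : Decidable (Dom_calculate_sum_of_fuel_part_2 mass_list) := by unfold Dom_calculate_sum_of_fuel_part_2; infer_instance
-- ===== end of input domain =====

-- B replaces A's explicit while-loop accumulation by a recursive fuel_for helper summed over the list (objective: simpler).
-- On Dom (|mass| ≤ 2^31) Python's int(x/3 - 2) equals truncating division by 3 minus 2, ported as Int.tdiv.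

-- step bound used by both ports' termination proofs
theorem pv_tdiv3_sub2_lt (f : Int) (h : 0 < f) : ((Int.tdiv f 3 - 2).toNat < f.toNat) := by
  have := Int.tdiv_le_self 3 (le_of_lt h)
  omega

-- ===== PORT A =====
-- the inner 'while fuel > 0' loop of A, carrying the running sum
def pvFuelLoop (fuel acc : Int) : Int :=
  if _h : fuel > 0 then pvFuelLoop (Int.tdiv fuel 3 - 2) (acc + fuel) else acc
termination_by fuel.toNat
decreasing_by exact pv_tdiv3_sub2_lt fuel _h

def calculate_sum_of_fuel_part_2 (mass_list : List Int) : Int :=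
  mass_list.foldl (fun final_sum_of_fuel mass => pvFuelLoop (Int.tdiv mass 3 - 2) final_sum_of_fuel) 0

-- ===== PORT B =====
def pvFuelFor (m : Int) : Int :=
  let fuel := Int.tdiv m 3 - 2
  if fuel ≤ 0 then 0 else fuel + pvFuelFor fuel
termination_by m.toNat
decreasing_by
  rename_i h
  have hm : 0 < m := by
    by_contra hm
    have : Int.tdiv m 3 ≤ 0 := by
      have := Int.tdiv_nonneg (a := -m) (b := (3:Int)) (by omega) (by omega)
      have hneg : Int.tdiv (-m) 3 = -Int.tdiv m 3 := Int.neg_tdiv m 3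
      omega
    omega
  exact pv_tdiv3_sub2_lt m hm

def calculate_sum_of_fuel_part_2_alt (mass_list : List Int) : Int :=
  (mass_list.map (fun mass => pvFuelFor mass)).sum

-- ===== PRECONDITION & SPEC =====
def Spec_calculate_sum_of_fuel_part_2 (mass_list : List Int) (out : Int) : Prop := out = calculate_sum_of_fuel_part_2_alt mass_list
instance (mass_list : List Int) (out : Int) : Decidable (Spec_calculate_sum_of_fuel_part_2 mass_list out) := by unfold Spec_calculate_sum_of_fuel_part_2; infer_instance

-- ===== CLAIM (what is proved, stated in full; the proofs are below) =====
def Claim_equal_calculate_sum_of_fuel_part_2 : Prop := ∀ (mass_list : List Int), Dom_calculate_sum_of_fuel_part_2 mass_list → Spec_calculate_sum_of_fuel_part_2 mass_list (calculate_sum_of_fuel_part_2 mass_list)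

-- ===== LEMMAS AND PROOFS =====

-- B's recursion satisfies its one-step unfolding (the let zeta-reduced)
theorem pvFuelFor_eq_chain (m : Int) :
    pvFuelFor m = (if Int.tdiv m 3 - 2 ≤ 0 then 0 else Int.tdiv m 3 - 2 + pvFuelFor (Int.tdiv m 3 - 2)) := by
  rw [pvFuelFor]

-- A's inner loop from fuel f adds exactly the fuel chain that B's recursion computes
theorem pvFuelLoop_eq (f acc : Int) :
    pvFuelLoop f acc = acc + (if f ≤ 0 then 0 else f + pvFuelFor f) := by
  rw [pvFuelLoop]
  split_ifs with h1 h2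
  · exact absurd h2 (by omega)
  · rw [pvFuelLoop_eq (Int.tdiv f 3 - 2) (acc + f), pvFuelFor_eq_chain f]
    ring
  · omega
  · exact absurd h1 (by omega)
termination_by f.toNat
decreasing_by exact pv_tdiv3_sub2_lt f h1

theorem pv_foldl_eq (l : List Int) (acc : Int) :
    l.foldl (fun final_sum_of_fuel mass => pvFuelLoop (Int.tdiv mass 3 - 2) final_sum_of_fuel) acc
      = acc + (l.map (fun mass => pvFuelFor mass)).sum := by
  induction l generalizing acc with
  | nil => simp
  | cons m t ih =>
    rw [List.foldl_cons, ih, pvFuelLoop_eq, ← pvFuelFor_eq_chain]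
    simp only [List.map_cons, List.sum_cons]
    ring

-- ===== VERDICT (by name: the statement is the Claim_ definition above) =====
theorem calculate_sum_of_fuel_part_2_spec : Claim_equal_calculate_sum_of_fuel_part_2 := by
  intro l _
  unfold Spec_calculate_sum_of_fuel_part_2 calculate_sum_of_fuel_part_2 calculate_sum_of_fuel_part_2_alt
  simpa using pv_foldl_eq l 0
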